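-- pv_equiv track=rewrite | github.com/kai3n/Daily-commit-project | Sanghyun/week30/덧칠하기.py | solution
-- ===== SOURCE A (Python) =====
-- from collections import deque
--
-- def solution(n, m, section):
--     # 몇번의 페인트 칠하는지 저장
--     answer = 0
--     # 페인트 안 칠해져있는곳 deque로 정의
--     queue  = deque(section)
--
--     while queue:
--         # 페인트 칠해야하는 부분 반환
--         start = queue.popleft()
--         # start+m 보다 queue[0]가 작으면 페인트 하나로 다 칠할수 있음
--         while queue and start + m > queue[0]:
--             queue.popleft()
--         # 페인트 칠하는 개수 갱신
--         answer+=1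
--     # 몇번 페인트 칠하는지 반환
--     return answer
-- ===== SOURCE B (Python) =====
-- def solution(n, m, section):
--     answer = 0
--     paint_end = None
--     for x in section:
--         if paint_end is None or x >= paint_end:
--             answer += 1
--             paint_end = x + m
--     return answer
-- ===== Notes on version B (the rewrite author's own statement) =====
-- stated objective: simpler
-- what changed: Replaces the deque plus inner popping while-loop with a single flat pass keeping only a count and the current swipe's end boundary.
import Mathlib
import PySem

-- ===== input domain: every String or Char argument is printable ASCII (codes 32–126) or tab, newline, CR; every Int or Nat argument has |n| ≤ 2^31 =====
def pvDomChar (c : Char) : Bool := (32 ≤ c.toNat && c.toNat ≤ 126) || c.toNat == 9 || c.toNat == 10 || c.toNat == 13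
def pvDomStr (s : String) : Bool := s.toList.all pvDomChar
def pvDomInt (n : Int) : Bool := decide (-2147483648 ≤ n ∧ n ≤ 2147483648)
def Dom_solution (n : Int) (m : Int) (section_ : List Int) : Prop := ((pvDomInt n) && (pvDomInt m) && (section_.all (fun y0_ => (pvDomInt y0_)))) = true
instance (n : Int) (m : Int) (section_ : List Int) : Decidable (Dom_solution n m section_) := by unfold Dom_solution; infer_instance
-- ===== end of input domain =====

-- B replaces A's deque and inner popping while-loop with one flat pass that keeps
-- only a swipe counter and the current swipe's end boundary (objective: simpler).

-- ===== PORT A =====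
-- inner `while queue and start + m > queue[0]: queue.popleft()`
def solutionInner (m : Int) (start : Int) : List Int → List Int
  | [] => []
  | x :: xs => if start + m > x then solutionInner m start xs else x :: xs

theorem solutionInner_length (m start : Int) (l : List Int) :
    (solutionInner m start l).length ≤ l.length := by
  induction l with
  | nil => simp [solutionInner]
  | cons x xs ih =>
    simp only [solutionInner]
    split
    · exact le_trans ih (Nat.le_succ _)
    · simp

-- outer `while queue:` loop, carrying `answer`
def solutionOuter (m : Int) (answer : Int) : List Int → Int
  | [] => answer
  | start :: rest => solutionOuter m (answer + 1) (solutionInner m start rest)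
termination_by l => l.length
decreasing_by
  exact Nat.lt_succ_of_le (solutionInner_length m start rest)

def solution (n : Int) (m : Int) (section_ : List Int) : Int :=
  solutionOuter m 0 section_

-- ===== PORT B =====
def solutionStep (m : Int) (s : Int × Option Int) (x : Int) : Int × Option Int :=
  match s.2 with
  | none => (s.1 + 1, some (x + m))
  | some pe => if x ≥ pe then (s.1 + 1, some (x + m)) else s

def solution_alt (n : Int) (m : Int) (section_ : List Int) : Int :=
  (section_.foldl (solutionStep m) (0, none)).1

-- ===== PRECONDITION & SPEC =====
def Spec_solution (n : Int) (m : Int) (section_ : List Int) (out : Int) : Prop := out = solution_alt n m section_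
instance (n : Int) (m : Int) (section_ : List Int) (out : Int) : Decidable (Spec_solution n m section_ out) := by unfold Spec_solution; infer_instance

-- ===== CLAIM (what is proved, stated in full; the proofs are below) =====
def Claim_equal_solution : Prop := ∀ (n : Int) (m : Int) (section_ : List Int), Dom_solution n m section_ → Spec_solution n m section_ (solution n m section_)

-- ===== LEMMAS AND PROOFS =====

theorem solutionOuter_shift (m : Int) (a : Int) (l : List Int) :
    solutionOuter m a l = a + solutionOuter m 0 l := by
  induction h : l.length using Nat.strong_induction_on generalizing l a with
  | _ k ih =>
    cases l with
    | nil => simp [solutionOuter]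
    | cons s rest =>
      subst h
      have hlt : (solutionInner m s rest).length < (s :: rest).length :=
        Nat.lt_succ_of_le (solutionInner_length m s rest)
      simp only [solutionOuter]
      rw [ih _ hlt (a + 1) _ rfl, ih _ hlt (0 + 1) _ rfl]
      ring

-- B's fold, once inside a swipe with boundary pe, counts exactly what A's outer
-- loop counts after the inner loop has dropped the covered prefix.
theorem foldl_some_eq (m : Int) (a pe : Int) (l : List Int) :
    (l.foldl (solutionStep m) (a, some pe)).1 =
      a + solutionOuter m 0 (solutionInner m (pe - m) l) := by
  induction l generalizing a pe with
  | nil => simp [solutionOuter, solutionInner]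
  | cons x xs ih =>
    simp only [List.foldl_cons, solutionStep, solutionInner]
    by_cases h : x ≥ pe
    · have h' : ¬ (pe - m + m > x) := by omega
      simp only [if_pos h, if_neg h']
      rw [ih, solutionOuter]
      have : x + m - m = x := by ring
      rw [this, solutionOuter_shift m (0 + 1)]
      ring
    · have h' : pe - m + m > x := by omega
      simp only [if_neg h, if_pos h']
      exact ih a pe

theorem solution_eq (m : Int) (l : List Int) :
    solutionOuter m 0 l = (l.foldl (solutionStep m) ((0 : Int), (none : Option Int))).1 := by
  cases l with
  | nil => simp [solutionOuter]
  | cons x xs =>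
    simp only [List.foldl_cons, solutionStep, solutionOuter]
    rw [foldl_some_eq]
    have : x + m - m = x := by ring
    rw [this, solutionOuter_shift m (0 + 1)]

-- ===== VERDICT (by name: the statement is the Claim_ definition above) =====
theorem solution_spec : Claim_equal_solution := by
  intro n m section_ _
  unfold Spec_solution solution solution_alt
  exact solution_eq m section_
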